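-- pv_equiv track=rewrite | github.com/irenepatsoura/project_458 | Part3/MyTryPy/CT_time_aproach.py | _simulate_cache_latency
-- ===== SOURCE A (Python) =====
-- def _simulate_cache_latency(byte_val: int) -> int:
--     """
--     Simulated leaky timing:
--
--       - byte_val > 200  -> slow (cache miss style)
--       - byte_val == 0   -> very slow (special case)
--       - else            -> fast
--
--     This creates a *strong* correlation between input and timing,
--     like an exaggerated cache side-channel.
--     """
--     dummy = 0
--     if byte_val > 200:
--         # Slow path
--         for x in range(100):
--             dummy += x
--     elif byte_val == 0:
--         # Very slow path
--         for x in range(150):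
--             dummy += x
--     else:
--         # Fast path
--         for x in range(10):
--             dummy += x
--     return dummy
-- ===== SOURCE B (Python) =====
-- def _simulate_cache_latency(byte_val: int) -> int:
--     n = 100 if byte_val > 200 else (150 if byte_val == 0 else 10)
--     return n * (n - 1) // 2
-- ===== Notes on version B (the rewrite author's own statement) =====
-- stated objective: simpler
-- what changed: Replaces each accumulation loop with the closed-form triangular number n*(n-1)//2, selecting n by the same three-way branch.
import Mathlib
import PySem

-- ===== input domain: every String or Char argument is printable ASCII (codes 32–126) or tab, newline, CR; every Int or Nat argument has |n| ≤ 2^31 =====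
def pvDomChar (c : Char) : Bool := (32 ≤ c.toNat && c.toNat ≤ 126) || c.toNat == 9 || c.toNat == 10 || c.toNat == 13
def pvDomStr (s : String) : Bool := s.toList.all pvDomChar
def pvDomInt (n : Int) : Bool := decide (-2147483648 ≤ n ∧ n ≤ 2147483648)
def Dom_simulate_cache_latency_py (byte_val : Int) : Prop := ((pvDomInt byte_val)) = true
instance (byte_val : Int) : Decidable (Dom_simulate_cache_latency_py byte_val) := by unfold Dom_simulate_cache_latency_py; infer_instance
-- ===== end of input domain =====

-- B replaces A's fixed accumulation loops with the closed-form triangular number n*(n-1)//2 (simpler).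


-- ===== PORT A =====
def simulate_cache_latency_py (byte_val : Int) : Int :=
  let dummy : Int := 0
  if byte_val > 200 then
    (PySem.List.pyRange 0 100 1).foldl (fun d x => d + x) dummy
  else if byte_val = 0 then
    (PySem.List.pyRange 0 150 1).foldl (fun d x => d + x) dummy
  else
    (PySem.List.pyRange 0 10 1).foldl (fun d x => d + x) dummy

-- ===== PORT B =====
def simulate_cache_latency_py_alt (byte_val : Int) : Int :=
  let n : Int := if byte_val > 200 then 100 else if byte_val = 0 then 150 else 10
  PySem.Int.floordiv (n * (n - 1)) 2

-- ===== PRECONDITION & SPEC =====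
def Spec_simulate_cache_latency_py (byte_val : Int) (out : Int) : Prop := out = simulate_cache_latency_py_alt byte_val
instance (byte_val : Int) (out : Int) : Decidable (Spec_simulate_cache_latency_py byte_val out) := by unfold Spec_simulate_cache_latency_py; infer_instance

-- ===== CLAIM (what is proved, stated in full; the proofs are below) =====
def Claim_equal_simulate_cache_latency_py : Prop := ∀ (byte_val : Int), Dom_simulate_cache_latency_py byte_val → Spec_simulate_cache_latency_py byte_val (simulate_cache_latency_py byte_val)

-- ===== LEMMAS AND PROOFS =====

-- ===== VERDICT (by name: the statement is the Claim_ definition above) =====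
set_option maxRecDepth 4000 in
theorem simulate_cache_latency_py_spec : Claim_equal_simulate_cache_latency_py := by
  intro b _
  unfold Spec_simulate_cache_latency_py simulate_cache_latency_py simulate_cache_latency_py_alt
  by_cases h1 : b > 200 <;> by_cases h2 : b = 0 <;> simp [h1, h2] <;> decide
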